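-- pv_equiv track=rewrite | github.com/LoanpyDataHub/loanpy | src/loanpy/apply.py | substitute_operations
-- ===== SOURCE A (Python) =====
-- def substitute_operations(operations):
--     i = 0
--     while i < len(operations) - 1:
--         if operations[i].startswith('delete ') and operations[i+1].startswith('insert '):
--             x = operations[i][7:]
--             y = operations[i+1][7:]
--             operations[i:i+2] = [f'substitute {x} by {y}']
--         elif operations[i].startswith('insert ') and operations[i+1].startswith('delete '):
--             x = operations[i][7:]
--             y = operations[i+1][7:]
--             operations[i:i+2] = [f'substitute {y} by {x}']
--         else:
--             i += 1
--     return operations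
-- ===== SOURCE B (Python) =====
-- def substitute_operations(operations):
--     # Single pass: merge each adjacent delete/insert pair once, skipping two on a merge.
--     # Matches A's in-place mutation by writing the result back into the argument list.
--     out = []
--     i = 0
--     n = len(operations)
--     while i < n:
--         if i + 1 < n:
--             a = operations[i]
--             b = operations[i + 1]
--             if a.startswith('delete ') and b.startswith('insert '):
--                 out.append(f'substitute {a[7:]} by {b[7:]}')
--                 i += 2
--                 continue
--             if a.startswith('insert ') and b.startswith('delete '):
--                 out.append(f'substitute {b[7:]} by {a[7:]}')
--                 i += 2
--                 continue
--         out.append(operations[i])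
--         i += 1
--     operations[:] = out
--     return operations
-- ===== Notes on version B (the rewrite author's own statement) =====
-- stated objective: alternative
-- what changed: A repeatedly splices the merged op into the list in place and re-examines the same index; B makes one left-to-right pass over the input, appending to a fresh output list and skipping two input elements per delete/insert merge, then writes the result back into the argument list.
import Mathlib
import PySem

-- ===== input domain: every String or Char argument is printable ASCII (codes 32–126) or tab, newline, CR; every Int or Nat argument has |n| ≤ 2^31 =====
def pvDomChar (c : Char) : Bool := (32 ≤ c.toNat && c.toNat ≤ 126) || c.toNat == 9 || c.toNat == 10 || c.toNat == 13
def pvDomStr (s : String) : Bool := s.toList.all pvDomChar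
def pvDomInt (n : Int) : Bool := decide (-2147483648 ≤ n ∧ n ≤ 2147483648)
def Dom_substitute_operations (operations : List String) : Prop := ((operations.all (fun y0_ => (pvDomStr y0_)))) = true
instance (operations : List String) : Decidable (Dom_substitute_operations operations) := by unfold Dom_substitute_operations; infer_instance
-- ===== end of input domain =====

-- B replaces A's in-place splicing loop by a single left-to-right pass that emits
-- merged ops into a fresh output list, skipping two input elements on a match
-- (objective: alternative). A mutates its argument in place; the equivalence proved
-- here is about the return value (Source B mirrors the mutation via operations[:] = out).


-- ===== PORT A =====
-- f'substitute {x} by {y}'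
def pvSubStr (x y : String) : String := "substitute " ++ x ++ " by " ++ y

-- the while loop of A: the list is spliced in place, i advances only in the else branch
def pvSubLoopA (ops : List String) (i : Nat) : List String :=
  if h : i + 1 < ops.length then
    let a := ops.getD i ""
    let b := ops.getD (i+1) ""
    if PySem.Str.startswith a "delete " && PySem.Str.startswith b "insert " then
      pvSubLoopA (ops.take i ++ [pvSubStr (PySem.Str.slice a (some 7) none) (PySem.Str.slice b (some 7) none)] ++ ops.drop (i+2)) i
    else if PySem.Str.startswith a "insert " && PySem.Str.startswith b "delete " then
      pvSubLoopA (ops.take i ++ [pvSubStr (PySem.Str.slice b (some 7) none) (PySem.Str.slice a (some 7) none)] ++ ops.drop (i+2)) i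
    else
      pvSubLoopA ops (i+1)
  else ops
termination_by ops.length - i
decreasing_by
  · simp [List.length_append, List.length_take, List.length_drop]; omega
  · simp [List.length_append, List.length_take, List.length_drop]; omega
  · omega

def substitute_operations (operations : List String) : List String :=
  pvSubLoopA operations 0

-- ===== PORT B =====
-- the while loop of B: out is the accumulator, the second list is operations[i:]
def pvSubLoopB (out : List String) : List String → List String
  | a :: b :: rest =>
    if PySem.Str.startswith a "delete " && PySem.Str.startswith b "insert " then
      pvSubLoopB (out ++ [pvSubStr (PySem.Str.slice a (some 7) none) (PySem.Str.slice b (some 7) none)]) rest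
    else if PySem.Str.startswith a "insert " && PySem.Str.startswith b "delete " then
      pvSubLoopB (out ++ [pvSubStr (PySem.Str.slice b (some 7) none) (PySem.Str.slice a (some 7) none)]) rest
    else
      pvSubLoopB (out ++ [a]) (b :: rest)
  | [a] => out ++ [a]
  | [] => out

def substitute_operations_alt (operations : List String) : List String :=
  pvSubLoopB [] operations

-- ===== PRECONDITION & SPEC =====
def Spec_substitute_operations (operations : List String) (out : List String) : Prop := out = substitute_operations_alt operations
instance (operations : List String) (out : List String) : Decidable (Spec_substitute_operations operations out) := by unfold Spec_substitute_operations; infer_instance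

-- ===== CLAIM (what is proved, stated in full; the proofs are below) =====
def Claim_equal_substitute_operations : Prop := ∀ (operations : List String), Dom_substitute_operations operations → Spec_substitute_operations operations (substitute_operations operations)

-- ===== LEMMAS AND PROOFS =====

-- accumulator lemma for B's loop
theorem pvSubLoopB_append : ∀ (l : List String) (out : List String),
    pvSubLoopB out l = out ++ pvSubLoopB [] l
  | [], out => by simp [pvSubLoopB]
  | [a], out => by simp [pvSubLoopB]
  | a :: b :: rest, out => by
    simp only [pvSubLoopB]
    split_ifs with h1 h2
    · rw [pvSubLoopB_append rest, pvSubLoopB_append rest (_ ++ _)]; simp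
    · rw [pvSubLoopB_append rest, pvSubLoopB_append rest (_ ++ _)]; simp
    · rw [pvSubLoopB_append (b :: rest), pvSubLoopB_append (b :: rest) (_ ++ _)]; simp

-- a merged op starts with "substitute ", hence with neither "delete " nor "insert "
theorem pvSubStr_not_delete (x y : String) :
    PySem.Str.startswith (pvSubStr x y) "delete " = false := by
  rw [Bool.eq_false_iff]
  intro h
  rw [PySem.Str.startswith_eq, PySem.Chars.startswith_iff] at h
  obtain ⟨t, ht⟩ := h
  simp [pvSubStr] at ht

theorem pvSubStr_not_insert (x y : String) :
    PySem.Str.startswith (pvSubStr x y) "insert " = false := by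
  rw [Bool.eq_false_iff]
  intro h
  rw [PySem.Str.startswith_eq, PySem.Chars.startswith_iff] at h
  obtain ⟨t, ht⟩ := h
  simp [pvSubStr] at ht

theorem pvSubLoopB_singleton (z : String) (t : List String) :
    pvSubLoopB [z] t = z :: pvSubLoopB [] t := by
  rw [pvSubLoopB_append]; simp

-- B's loop passes a leading merged op through unchanged
theorem pvSubLoopB_subStr (x y : String) (t : List String) :
    pvSubLoopB [] (pvSubStr x y :: t) = pvSubStr x y :: pvSubLoopB [] t := by
  cases t with
  | nil => simp [pvSubLoopB]
  | cons c rest =>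
    simp only [pvSubLoopB, pvSubStr_not_delete, pvSubStr_not_insert, Bool.false_and,
      if_false, Bool.false_eq_true]
    rw [pvSubLoopB_append]
    simp

-- the while loop expressed on the suffix operations[i:]
theorem pvSubLoopA_eq (ops : List String) (i : Nat) :
    pvSubLoopA ops i = ops.take i ++ pvSubLoopB [] (ops.drop i) := by
  rw [pvSubLoopA]
  split
  case isFalse h =>
    rcases hdrop : ops.drop i with _ | ⟨a, _ | ⟨b, t⟩⟩
    · simp [pvSubLoopB, ← hdrop]
    · rw [pvSubLoopB, ← hdrop]; simp
    · exfalso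
      have := congrArg List.length hdrop
      simp at this
      omega
  case isTrue h =>
    have hi : i < ops.length := by omega
    have hd1 : ops.drop i = ops.getD i "" :: ops.drop (i+1) := by
      rw [List.getD_eq_getElem _ _ hi, List.drop_eq_getElem_cons hi]
    have hd2 : ops.drop (i+1) = ops.getD (i+1) "" :: ops.drop (i+2) := by
      rw [List.getD_eq_getElem _ _ h, List.drop_eq_getElem_cons h]
    have htk : (ops.take i).length = i := by simp; omega
    dsimp only
    split_ifs with h1 h2
    · rw [pvSubLoopA_eq _ i]
      rw [show ops.take i ++ [pvSubStr (PySem.Str.slice (ops.getD i "") (some 7) none)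
            (PySem.Str.slice (ops.getD (i+1) "") (some 7) none)] ++ ops.drop (i+2)
          = ops.take i ++ ([pvSubStr (PySem.Str.slice (ops.getD i "") (some 7) none)
            (PySem.Str.slice (ops.getD (i+1) "") (some 7) none)] ++ ops.drop (i+2)) by simp]
      rw [List.take_left' htk, List.drop_left' htk]
      rw [hd1, hd2, pvSubLoopB, if_pos h1]
      simp [pvSubLoopB_singleton, pvSubLoopB_subStr]
    · rw [pvSubLoopA_eq _ i]
      rw [show ops.take i ++ [pvSubStr (PySem.Str.slice (ops.getD (i+1) "") (some 7) none)
            (PySem.Str.slice (ops.getD i "") (some 7) none)] ++ ops.drop (i+2)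
          = ops.take i ++ ([pvSubStr (PySem.Str.slice (ops.getD (i+1) "") (some 7) none)
            (PySem.Str.slice (ops.getD i "") (some 7) none)] ++ ops.drop (i+2)) by simp]
      rw [List.take_left' htk, List.drop_left' htk]
      rw [hd1, hd2, pvSubLoopB, if_neg h1, if_pos h2]
      simp [pvSubLoopB_singleton, pvSubLoopB_subStr]
    · rw [pvSubLoopA_eq _ (i+1)]
      rw [hd1, hd2, pvSubLoopB, if_neg h1, if_neg h2, pvSubLoopB_append]
      simp only [List.nil_append]
      rw [pvSubLoopB_singleton, List.take_add_one, List.getElem?_eq_getElem hi]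
      simp only [Option.toList_some, List.append_assoc, List.cons_append, List.nil_append]
      simp [List.getElem?_eq_getElem hi]
  termination_by ops.length - i
  decreasing_by
  · simp [List.length_append, List.length_take, List.length_drop]; omega
  · simp [List.length_append, List.length_take, List.length_drop]; omega
  · omega

-- ===== VERDICT (by name: the statement is the Claim_ definition above) =====
theorem substitute_operations_spec : Claim_equal_substitute_operations := by
  intro ops _
  show _ = _
  simp [substitute_operations, substitute_operations_alt, pvSubLoopA_eq ops 0]
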